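-- pv_equiv track=rewrite | github.com/martinrojasmet/Proyecto-MSR | logic.py | get_repeated_nodes
-- ===== SOURCE A (Python) =====
-- def get_repeated_nodes(path_javier, path_andreina):
--     repeated_nodes_javier = []
--     repeated_nodes_andreina = []
--     for node in path_javier:
--         for node2 in path_andreina:
--             if node[0] == node2[0]:
--                 repeated_nodes_javier.append(node)
--                 repeated_nodes_andreina.append(node2)
--
--     return (repeated_nodes_javier, repeated_nodes_andreina)
-- ===== SOURCE B (Python) =====
-- def get_repeated_nodes(path_javier, path_andreina):
--     # If either path is empty there can be no matching pair.
--     if not path_javier or not path_andreina: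
--         return ([], [])
--     # Index andreina nodes by their first element once, then look up each javier node.
--     index = {}
--     for node2 in path_andreina:
--         index.setdefault(node2[0], []).append(node2)
--     repeated_nodes_javier = []
--     repeated_nodes_andreina = []
--     for node in path_javier:
--         matches = index.get(node[0], [])
--         repeated_nodes_javier.extend([node] * len(matches))
--         repeated_nodes_andreina.extend(matches)
--     return (repeated_nodes_javier, repeated_nodes_andreina)
-- ===== Notes on version B (the rewrite author's own statement) =====
-- stated objective: alternative
-- what changed: Replaces the nested scan with a one-pass dict grouping andreina nodes by first element, then a single lookup pass over javier nodes (the inner scan disappears; total cost is dominated by the output size, so it is not measured faster).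
import Mathlib
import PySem

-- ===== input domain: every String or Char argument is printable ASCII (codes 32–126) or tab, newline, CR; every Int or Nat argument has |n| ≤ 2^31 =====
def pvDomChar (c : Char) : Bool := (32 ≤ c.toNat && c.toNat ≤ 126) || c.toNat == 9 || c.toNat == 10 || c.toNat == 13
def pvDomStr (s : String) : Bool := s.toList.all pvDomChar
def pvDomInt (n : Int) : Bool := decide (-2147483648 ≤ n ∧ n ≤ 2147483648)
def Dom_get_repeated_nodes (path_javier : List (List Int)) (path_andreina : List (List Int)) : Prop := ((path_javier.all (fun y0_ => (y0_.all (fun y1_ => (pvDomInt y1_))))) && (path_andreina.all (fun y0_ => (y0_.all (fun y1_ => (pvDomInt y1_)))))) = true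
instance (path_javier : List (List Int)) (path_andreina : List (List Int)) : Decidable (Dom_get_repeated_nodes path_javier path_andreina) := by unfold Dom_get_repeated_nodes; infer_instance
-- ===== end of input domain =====

-- B replaces A's nested scan with a dict grouping andreina nodes by first element plus one lookup pass (alternative algorithm; cost dominated by output size, not measured faster).


-- ===== PORT A =====
-- node[0] is ported as List.head? (= PySem.List.pyGet? node 0); on Pre_ it is never evaluated on an empty node, so it is exact.
def get_repeated_nodes (path_javier : List (List Int)) (path_andreina : List (List Int)) : List (List Int) × List (List Int) :=
  path_javier.foldl (fun acc node =>
    path_andreina.foldl (fun acc2 node2 =>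
      if node.head? = node2.head? then (acc2.1 ++ [node], acc2.2 ++ [node2]) else acc2) acc)
    ([], [])

-- ===== PORT B =====
-- index.setdefault(k, []).append(v) is Dict.modify k [] (· ++ [v]); [node] * len(ms) is List.replicate.
def get_repeated_nodes_alt (path_javier : List (List Int)) (path_andreina : List (List Int)) : List (List Int) × List (List Int) :=
  if path_javier = [] ∨ path_andreina = [] then ([], [])
  else
    let index : PySem.Dict (Option Int) (List (List Int)) :=
      path_andreina.foldl (fun d node2 => d.modify node2.head? [] (· ++ [node2])) PySem.Dict.empty
    path_javier.foldl (fun acc node =>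
      let ms := index.getD node.head? []
      (acc.1 ++ List.replicate ms.length node, acc.2 ++ ms))
      ([], [])

-- ===== PRECONDITION & SPEC =====
-- Pre_ excludes exactly the inputs on which Python A raises IndexError: both paths nonempty and
-- some node an empty list (then node[0] of every node is evaluated and the empty one raises).
def Pre_get_repeated_nodes (path_javier : List (List Int)) (path_andreina : List (List Int)) : Prop :=
  path_javier = [] ∨ path_andreina = [] ∨
    ((∀ n ∈ path_javier, n ≠ []) ∧ (∀ n ∈ path_andreina, n ≠ []))
instance (path_javier : List (List Int)) (path_andreina : List (List Int)) : Decidable (Pre_get_repeated_nodes path_javier path_andreina) := by unfold Pre_get_repeated_nodes; infer_instance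
def pvWitness_get_repeated_nodes : List (List Int) × List (List Int) := ([[1, 2], [3]], [[1, 9], [4], [1, 0]])
def Spec_get_repeated_nodes (path_javier : List (List Int)) (path_andreina : List (List Int)) (out : List (List Int) × List (List Int)) : Prop := out = get_repeated_nodes_alt path_javier path_andreina
instance (path_javier : List (List Int)) (path_andreina : List (List Int)) (out : List (List Int) × List (List Int)) : Decidable (Spec_get_repeated_nodes path_javier path_andreina out) := by unfold Spec_get_repeated_nodes; infer_instance

-- ===== CLAIM (what is proved, stated in full; the proofs are below) =====
def Claim_equal_get_repeated_nodes : Prop := ∀ (path_javier : List (List Int)) (path_andreina : List (List Int)), Dom_get_repeated_nodes path_javier path_andreina → Pre_get_repeated_nodes path_javier path_andreina → Spec_get_repeated_nodes path_javier path_andreina (get_repeated_nodes path_javier path_andreina)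

-- ===== LEMMAS AND PROOFS =====

-- The grouping dict: looking up k returns the andreina nodes with first element k, in order.
theorem pv_index_getD (pa : List (List Int)) (d : PySem.Dict (Option Int) (List (List Int))) (k : Option Int) :
    (pa.foldl (fun d node2 => d.modify node2.head? [] (· ++ [node2])) d).getD k []
      = d.getD k [] ++ pa.filter (fun n2 => n2.head? == k) := by
  induction pa generalizing d with
  | nil => simp
  | cons h t ih =>
    simp only [List.foldl_cons, List.filter_cons, ih, PySem.Dict.getD_modify]
    by_cases hk : k = h.head?
    · simp [hk]
    · simp [hk, beq_iff_eq, Ne.symm hk]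

-- A's inner loop over path_andreina appends node once per match and the matches themselves.
theorem pv_innerA (node : List Int) (pa : List (List Int)) (acc : List (List Int) × List (List Int)) :
    pa.foldl (fun acc2 node2 =>
        if node.head? = node2.head? then (acc2.1 ++ [node], acc2.2 ++ [node2]) else acc2) acc
      = (acc.1 ++ (pa.filter (fun n2 => n2.head? == node.head?)).map (fun _ => node),
         acc.2 ++ pa.filter (fun n2 => n2.head? == node.head?)) := by
  induction pa generalizing acc with
  | nil => simp
  | cons h t ih =>
    simp only [List.foldl_cons, List.filter_cons, ih]
    by_cases hk : node.head? = h.head?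
    · simp [hk]
    · simp [beq_iff_eq, Ne.symm hk, hk]

theorem pv_main (path_javier path_andreina : List (List Int)) :
    get_repeated_nodes path_javier path_andreina = get_repeated_nodes_alt path_javier path_andreina := by
  unfold get_repeated_nodes get_repeated_nodes_alt
  by_cases he : path_javier = [] ∨ path_andreina = []
  · rcases he with h | h <;> simp [h]
  · push_neg at he
    rw [if_neg (by tauto : ¬(path_javier = [] ∨ path_andreina = []))]
    have step : ∀ acc : List (List Int) × List (List Int), ∀ node,
        path_andreina.foldl (fun acc2 node2 =>
          if node.head? = node2.head? then (acc2.1 ++ [node], acc2.2 ++ [node2]) else acc2) acc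
        = (let ms := (path_andreina.foldl
              (fun d node2 => d.modify node2.head? [] (· ++ [node2])) PySem.Dict.empty).getD node.head? []
           (acc.1 ++ List.replicate ms.length node, acc.2 ++ ms)) := by
      intro acc node
      rw [pv_innerA, pv_index_getD]
      simp [List.map_const']
    have : ∀ (l : List (List Int)) (acc : List (List Int) × List (List Int)),
        l.foldl (fun acc node =>
          path_andreina.foldl (fun acc2 node2 =>
            if node.head? = node2.head? then (acc2.1 ++ [node], acc2.2 ++ [node2]) else acc2) acc) acc
        = l.foldl (fun acc node =>
            let ms := (path_andreina.foldl
              (fun d node2 => d.modify node2.head? [] (· ++ [node2])) PySem.Dict.empty).getD node.head? []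
            (acc.1 ++ List.replicate ms.length node, acc.2 ++ ms)) acc := by
      intro l
      induction l with
      | nil => intro acc; rfl
      | cons h' t' ih' => intro acc; simp only [List.foldl_cons, step]
    exact this path_javier ([], [])

-- ===== VERDICT (by name: the statement is the Claim_ definition above) =====
theorem get_repeated_nodes_spec : Claim_equal_get_repeated_nodes := by
  intro pj pa _ _
  unfold Spec_get_repeated_nodes
  exact pv_main pj pa
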